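-- pv_equiv track=rewrite | github.com/carolapedrosa/laboratorio-de-dsp_fpga | FPGA/dsp_fpga/platform/platform.py | change_keep
-- ===== SOURCE A (Python) =====
-- def change_keep(file):
--     res = []
--     last = False
--
--     for line in file.splitlines():
--         if line.strip() == '(* keep = "true" *)':
--             last = True
--
--         elif last:
--             res.append(line[:line.find(';')] + " /* synthesis keep */ ;")
--             last = False
--
--         else:
--             res.append(line)
--
--     return '\n'.join(res)
-- ===== SOURCE B (Python) =====
-- PRAGMA = '(* keep = "true" *)'
-- ANNOT = " /* synthesis keep */ ;"
--
-- def change_keep(file):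
--     # Stage 1: split the lines into segments separated by pragma lines.
--     segs = [[]]
--     for line in file.splitlines():
--         if line.strip() == PRAGMA:
--             segs.append([])
--         else:
--             segs[-1].append(line)
--     # Stage 2: flatten; every segment after the first had a pragma right
--     # before it, so its first line (if any) gets the keep annotation.
--     out = list(segs[0])
--     for seg in segs[1:]:
--         if seg:
--             out.append(seg[0][:seg[0].find(';')] + ANNOT)
--             out.extend(seg[1:])
--     return '\n'.join(out)
-- ===== Notes on version B (the rewrite author's own statement) =====
-- stated objective: alternative
-- what changed: Replaces A's flag-threaded single pass by a split-then-flatten pipeline: lines are first partitioned into segments separated by pragma lines, then the segments are flattened with the first line of every segment after the first getting the keep annotation.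
import Mathlib
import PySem

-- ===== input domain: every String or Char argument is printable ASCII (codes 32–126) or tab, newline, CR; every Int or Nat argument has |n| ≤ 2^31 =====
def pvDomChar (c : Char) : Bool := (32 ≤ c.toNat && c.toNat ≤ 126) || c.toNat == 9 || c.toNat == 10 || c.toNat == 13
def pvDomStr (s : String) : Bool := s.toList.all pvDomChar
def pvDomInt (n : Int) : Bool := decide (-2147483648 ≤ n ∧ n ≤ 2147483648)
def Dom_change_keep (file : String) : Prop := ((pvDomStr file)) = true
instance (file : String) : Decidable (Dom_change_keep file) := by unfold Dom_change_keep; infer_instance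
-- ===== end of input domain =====

-- B replaces A's flag-threaded single pass by a split-then-flatten pipeline:
-- lines are partitioned into segments separated by pragma lines, then flattened
-- with the first line of each later segment annotated (alternative decomposition, same cost).

def ckPragma : String := "(* keep = \"true\" *)"
def ckAnnot : String := " /* synthesis keep */ ;"
-- line[:line.find(';')] + " /* synthesis keep */ ;"  (shared literal transform of both Pythons)
def ckTransform (line : String) : String :=
  PySem.Str.slice line none (some (PySem.Str.find line ";")) ++ ckAnnot

-- ===== PORT A =====
-- step of A's for-loop: state (res, last)
def ckStepA (st : List String × Bool) (line : String) : List String × Bool :=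
  if PySem.Str.strip line == ckPragma then (st.1, true)
  else if st.2 then (st.1 ++ [ckTransform line], false)
  else (st.1 ++ [line], false)

def change_keep (file : String) : String :=
  PySem.Str.join "\n" ((PySem.Str.splitlines file).foldl ckStepA ([], false)).1

-- ===== PORT B =====
-- segs[-1].append(line): append to the last segment (segs is never empty)
def ckAppendLast : List (List String) → String → List (List String)
  | [], l => [[l]]
  | [s], l => [s ++ [l]]
  | s :: t :: rest, l => s :: ckAppendLast (t :: rest) l

-- stage-1 step of B: start a new segment at a pragma line, else extend the last one
def ckSegStep (segs : List (List String)) (line : String) : List (List String) :=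
  if PySem.Str.strip line == ckPragma then segs ++ [[]] else ckAppendLast segs line

-- stage-2 emission for a segment after the first: annotate its first line
def ckEmit : List String → List String
  | [] => []
  | x :: r => ckTransform x :: r

def change_keep_alt (file : String) : String :=
  let segs := (PySem.Str.splitlines file).foldl ckSegStep [[]]
  PySem.Str.join "\n" (segs.headD [] ++ segs.tail.flatMap ckEmit)

-- ===== PRECONDITION & SPEC =====
def Spec_change_keep (file : String) (out : String) : Prop := out = change_keep_alt file
instance (file : String) (out : String) : Decidable (Spec_change_keep file out) := by unfold Spec_change_keep; infer_instance

-- ===== CLAIM (what is proved, stated in full; the proofs are below) =====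
def Claim_equal_change_keep : Prop := ∀ (file : String), Dom_change_keep file → Spec_change_keep file (change_keep file)

-- ===== LEMMAS AND PROOFS =====

-- reference recursion: what both sides compute, line-list to line-list
mutual
def ckMain : List String → List String
  | [] => []
  | l :: rest => if PySem.Str.strip l == ckPragma then ckSkip rest else l :: ckMain rest
def ckSkip : List String → List String
  | [] => []
  | l :: rest => if PySem.Str.strip l == ckPragma then ckSkip rest else ckTransform l :: ckMain rest
end

-- A's fold equals the reference recursion
theorem ck_fold_eq (ls : List String) : ∀ (res : List String) (last : Bool),
    (ls.foldl ckStepA (res, last)).1 = res ++ (if last then ckSkip ls else ckMain ls) := by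
  induction ls with
  | nil => intro res last; cases last <;> simp [ckMain, ckSkip]
  | cons l rest ih =>
    intro res last
    cases last <;> by_cases h : PySem.Str.strip l == ckPragma <;>
      simp [ckMain, ckSkip, ckStepA, h, ih]

-- functional form of B's stage-1 fold
def ckF : List String → List String → List (List String)
  | [], cur => [cur]
  | l :: rest, cur =>
    if PySem.Str.strip l == ckPragma then cur :: ckF rest [] else ckF rest (cur ++ [l])

theorem ck_appendLast_eq (init : List (List String)) (cur : List String) (l : String) :
    ckAppendLast (init ++ [cur]) l = init ++ [cur ++ [l]] := by
  induction init with
  | nil => simp [ckAppendLast]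
  | cons s t ih =>
    cases t with
    | nil => simp [ckAppendLast]
    | cons u v => simpa [ckAppendLast] using ih

theorem ck_fold_seg (ls : List String) : ∀ (init : List (List String)) (cur : List String),
    ls.foldl ckSegStep (init ++ [cur]) = init ++ ckF ls cur := by
  induction ls with
  | nil => intro init cur; simp [ckF]
  | cons l rest ih =>
    intro init cur
    by_cases h : PySem.Str.strip l == ckPragma
    · rw [List.foldl_cons,
          show ckSegStep (init ++ [cur]) l = (init ++ [cur]) ++ [[]] by simp [ckSegStep, h],
          ih (init ++ [cur]) []]
      simp [ckF, h]
    · rw [List.foldl_cons,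
          show ckSegStep (init ++ [cur]) l = init ++ [cur ++ [l]] by
            simp [ckSegStep, h, ck_appendLast_eq],
          ih init (cur ++ [l])]
      simp [ckF, h]

-- stage-2 over ckF: tail-segment flattening equals ckSkip / the cons form
theorem ck_flat_eq (ls : List String) :
    (∀ x r, (ckF ls (x :: r)).flatMap ckEmit = ckTransform x :: (r ++ ckMain ls)) ∧
    ((ckF ls []).flatMap ckEmit = ckSkip ls) := by
  induction ls with
  | nil => constructor <;> intros <;> simp [ckF, ckEmit, ckMain, ckSkip]
  | cons l rest ih =>
    by_cases h : PySem.Str.strip l == ckPragma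
    · constructor
      · intro x r
        simp [ckF, h, ckEmit, ckMain, ih.2]
      · simp [ckF, h, ckEmit, ckSkip, ih.2]
    · constructor
      · intro x r
        rw [show ckF (l :: rest) (x :: r) = ckF rest ((x :: r) ++ [l]) by simp [ckF, h]]
        simp [ih.1, ckMain, h]
      · rw [show ckF (l :: rest) [] = ckF rest [l] by simp [ckF, h]]
        simp [ih.1, ckSkip, h]

-- the head segment plus flattened tail equals ckMain
theorem ck_head_flat (ls : List String) : ∀ (cur : List String),
    (ckF ls cur).headD [] ++ ((ckF ls cur).tail).flatMap ckEmit = cur ++ ckMain ls := by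
  induction ls with
  | nil => intro cur; simp [ckF, ckMain]
  | cons l rest ih =>
    intro cur
    by_cases h : PySem.Str.strip l == ckPragma
    · simp [ckF, h, ckMain, (ck_flat_eq rest).2]
    · rw [show ckF (l :: rest) cur = ckF rest (cur ++ [l]) by simp [ckF, h], ih (cur ++ [l])]
      simp [ckMain, h]

-- ===== VERDICT (by name: the statement is the Claim_ definition above) =====
theorem change_keep_spec : Claim_equal_change_keep := by
  intro file _
  unfold Spec_change_keep change_keep change_keep_alt
  rw [ck_fold_eq]
  have hseg : List.foldl ckSegStep [[]] (PySem.Str.splitlines file)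
      = ckF (PySem.Str.splitlines file) [] := by
    simpa using ck_fold_seg (PySem.Str.splitlines file) [] []
  have h2 := ck_head_flat (PySem.Str.splitlines file) []
  rw [List.nil_append] at h2
  rw [hseg, ← h2]
  cases ckF (PySem.Str.splitlines file) [] <;> simp [List.headD]
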